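-- pv_equiv track=rewrite | github.com/Charlot-DEDJINOU/Best-Flag | cryptographie/offset.py | decrypting
-- ===== SOURCE A (Python) =====
-- def decrypting(s, key):
--     if len(s) > key and key > 0:
--         res = [''] * len(s)
--
--         for i in range(len(s)):
--             index = i
--             for _ in range(key):
--                 index -= 1
--                 if index < 0:
--                     index = len(s) - 1
--             nextPlace = index
--             res[nextPlace] = s[i]
--
--         return ''.join(res)
--     else:
--         return s
-- ===== SOURCE B (Python) =====
-- def decrypting(s, key):
--     if len(s) > key and key > 0:
--         return s[key:] + s[:key]
--     else:
--         return s
-- ===== Notes on version B (the rewrite author's own statement) =====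
-- stated objective: faster
-- what changed: Replaced the per-character placement loop with its O(key) modular-decrement inner loop by a single two-slice concatenation s[key:] + s[:key] under the identical guard.
import Mathlib
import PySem

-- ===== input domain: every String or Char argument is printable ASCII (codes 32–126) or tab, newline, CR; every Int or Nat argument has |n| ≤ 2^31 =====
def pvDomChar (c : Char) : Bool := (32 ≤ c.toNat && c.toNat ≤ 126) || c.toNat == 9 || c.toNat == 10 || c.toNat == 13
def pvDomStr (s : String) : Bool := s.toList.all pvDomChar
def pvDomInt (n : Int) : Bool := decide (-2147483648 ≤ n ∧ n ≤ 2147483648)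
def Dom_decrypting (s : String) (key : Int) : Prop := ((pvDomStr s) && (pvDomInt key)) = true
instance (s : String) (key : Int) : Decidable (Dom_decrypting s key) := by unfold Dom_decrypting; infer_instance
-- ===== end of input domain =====

-- B replaces A's O(n*key) placement loop (per-character modular-decrement inner loop) by one
-- two-slice concatenation s[key:] + s[:key] under the identical guard (faster).

-- ===== PORT A =====
def decrypting (s : String) (key : Int) : String :=
  let cs := s.toList
  let n : Int := PySem.List.len cs
  if n > key ∧ key > 0 then
    let res :=
      (PySem.List.pyRange 0 n 1).foldl (fun res i =>
        let index :=
          (PySem.List.pyRange 0 key 1).foldl (fun index _ =>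
            let index := index - 1
            if index < 0 then n - 1 else index) i
        PySem.List.pySetD res index [PySem.List.pyGetD cs i ' '])
        (List.replicate cs.length ([] : List Char))
    String.ofList (PySem.Chars.join [] res)
  else s

-- ===== PORT B =====
def decrypting_alt (s : String) (key : Int) : String :=
  let cs := s.toList
  if PySem.List.len cs > key ∧ key > 0 then
    String.ofList (PySem.List.slice cs (some key) none ++ PySem.List.slice cs none (some key))
  else s

-- ===== PRECONDITION & SPEC =====
def Spec_decrypting (s : String) (key : Int) (out : String) : Prop := out = decrypting_alt s key
instance (s : String) (key : Int) (out : String) : Decidable (Spec_decrypting s key out) := by unfold Spec_decrypting; infer_instance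

-- ===== CLAIM (what is proved, stated in full; the proofs are below) =====
def Claim_equal_decrypting : Prop := ∀ (s : String) (key : Int), Dom_decrypting s key → Spec_decrypting s key (decrypting s key)

-- ===== LEMMAS AND PROOFS =====

-- a fold that ignores the list elements is iteration
theorem pv_foldl_const {α β : Type} (g : β → β) (l : List α) (i : β) :
    l.foldl (fun a _ => g a) i = g^[l.length] i := by
  induction l generalizing i with
  | nil => rfl
  | cons x xs ih => simp [List.foldl_cons, ih, Function.iterate_succ_apply]

-- A's inner modular-decrement loop computes (j - m) mod n
theorem pv_iter_wrap (n : Int) (hn : 2 ≤ n) (m : Nat) (j : Int) (h0 : 0 ≤ j) (h1 : j < n) :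
    (fun idx : Int => if idx - 1 < 0 then n - 1 else idx - 1)^[m] j = (j - m) % n := by
  induction m with
  | zero => simpa using (Int.emod_eq_of_lt h0 h1).symm
  | succ m ih =>
    rw [Function.iterate_succ_apply', ih]
    have hnpos : (0:Int) < n := by omega
    have hr0 : 0 ≤ (j - (m:Int)) % n := Int.emod_nonneg _ (by omega)
    have hr1 : (j - (m:Int)) % n < n := Int.emod_lt_of_pos _ hnpos
    have hone : (1:Int) % n = 1 := Int.emod_eq_of_lt (by omega) (by omega)
    have hsub : (j - ((m:Nat)+1 : Nat)) % n = ((j - (m:Int)) % n - 1) % n := by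
      push_cast
      conv_lhs => rw [show j - ((m:Int)+1) = (j - (m:Int)) - 1 by ring]
      rw [Int.sub_emod, hone]
    by_cases hz : (j - (m:Int)) % n - 1 < 0
    · have hz0 : (j - (m:Int)) % n = 0 := by omega
      rw [if_pos hz, hsub, hz0]
      have h1n : ((0:Int) - 1) % n = (n - 1) % n := by
        conv_rhs => rw [show (n - 1 : Int) = 0 - 1 + n * 1 by ring, Int.add_mul_emod_self_left]
      rw [h1n]
      exact (Int.emod_eq_of_lt (by omega) (by omega)).symm
    · rw [if_neg hz, hsub]
      exact (Int.emod_eq_of_lt (by omega) (by omega)).symm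

-- a mod with a single wrap
theorem pv_mod_small (n a : Nat) (h : a < 2 * n) : a % n = if a < n then a else a - n := by
  split_ifs with h'
  · exact Nat.mod_eq_of_lt h'
  · rw [Nat.mod_eq_sub_mod (by omega), Nat.mod_eq_of_lt (by omega)]

-- the outer-loop invariant: after processing indices 0..m-1, slot (i-k) mod n holds [cs[i]] for i < m
theorem pv_loop_inv (cs : List Char) (n k : Nat) (hcn : cs.length = n) (hk : 1 ≤ k) (hkn : k < n) :
    ∀ m, m ≤ n →
      (List.range m).foldl
        (fun res t => (res.set ((t + (n - k)) % n) [cs.getD t ' ']))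
        (List.replicate n ([] : List Char))
      = (List.range n).map
          (fun j => if (j + k) % n < m then [cs.getD ((j + k) % n) ' '] else ([] : List Char)) := by
  intro m
  induction m with
  | zero =>
    intro _
    simp only [List.range_zero, List.foldl_nil]
    refine List.ext_getElem (by simp) ?_
    intro j h1 h2
    simp
  | succ m ih =>
    intro hm
    have hn0 : 0 < n := by omega
    rw [List.range_succ, List.foldl_append, ih (by omega)]
    simp only [List.foldl_cons, List.foldl_nil]
    refine List.ext_getElem (by simp) ?_
    intro j h1 h2
    have hj : j < n := by simpa using h1
    have hpj : (j + k) % n = if j + k < n then j + k else j + k - n :=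
      pv_mod_small n (j + k) (by omega)
    have hpm : (m + (n - k)) % n = if m + (n - k) < n then m + (n - k) else m + (n - k) - n :=
      pv_mod_small n (m + (n - k)) (by omega)
    have hplt : (m + (n - k)) % n < n := Nat.mod_lt _ hn0
    rw [List.getElem_set, List.getElem_map, List.getElem_map]
    have hiff : ((m + (n - k)) % n = j) ↔ ((j + k) % n = m) := by
      rw [hpj, hpm]; split_ifs <;> omega
    by_cases he : (m + (n - k)) % n = j
    · have hm' : (j + k) % n = m := hiff.mp he
      simp [he, hm']
    · have hm' : (j + k) % n ≠ m := fun h => he (hiff.mpr h)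
      have : ((j + k) % n < m + 1) ↔ ((j + k) % n < m) := by omega
      simp [he, List.getElem_range, this]

-- the rearranged list is the rotation
theorem pv_rot (cs : List Char) (n k : Nat) (hcn : cs.length = n) (hkn : k < n) :
    (List.range n).map (fun j => cs.getD ((j + k) % n) ' ')
      = cs.drop k ++ cs.take k := by
  subst hcn
  set n := cs.length with hn
  refine List.ext_getElem (by simp; omega) ?_
  intro j h1 h2
  have hj : j < n := by simpa using h1
  have hmod : (j + k) % n = if j + k < n then j + k else j + k - n :=
    pv_mod_small n (j + k) (by omega)
  have hlt : (j + k) % n < n := Nat.mod_lt _ (by omega)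
  rw [List.getElem_map, List.getElem_range, List.getD_eq_getElem cs ' ' hlt]
  rcases Nat.lt_or_ge j (n - k) with hcase | hcase
  · have heq : (j + k) % n = j + k := by rw [hmod, if_pos (by omega)]
    simp only [heq]
    rw [List.getElem_append_left (by simp; omega), List.getElem_drop]
    congr 1
    omega
  · have heq : (j + k) % n = j + k - n := by rw [hmod, if_neg (by omega)]
    simp only [heq]
    rw [List.getElem_append_right (by simp; omega), List.getElem_take]
    congr 1
    simp only [List.length_drop]
    omega

-- ===== VERDICT (by name: the statement is the Claim_ definition above) =====
theorem decrypting_spec : Claim_equal_decrypting := by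
  intro s key _
  unfold Spec_decrypting decrypting decrypting_alt
  simp only [PySem.List.len_eq]
  set cs := s.toList with hcs
  by_cases h : ((cs.length : Int) > key ∧ key > 0)
  · rw [if_pos h, if_pos h]
    obtain ⟨hlen, hpos⟩ := h
    set n := cs.length with hn
    set k := key.toNat with hkdef
    have hkey : key = (k : Int) := by omega
    have hk1 : 1 ≤ k := by omega
    have hkn : k < n := by omega
    have hn2 : (2:Int) ≤ (n:Int) := by omega
    congr 1
    -- rewrite the outer fold over pyRange into a fold over List.range
    rw [PySem.List.pyRange_one 0 (n:Int), List.foldl_map]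
    have hrange : ((n:Int) - 0).toNat = n := by omega
    rw [hrange]
    -- the inner loop at index t computes (t - key) mod n, and the set index is (t + (n-k)) % n
    have hstep : ∀ (res : List (List Char)) (t : Nat), t < n →
        PySem.List.pySetD res
          ((PySem.List.pyRange 0 key 1).foldl (fun index _ =>
            if index - 1 < 0 then (n:Int) - 1 else index - 1) (0 + (t:Int)))
          [PySem.List.pyGetD cs (0 + (t:Int)) ' ']
        = res.set ((t + (n - k)) % n) [cs.getD t ' '] := by
      intro res t ht
      rw [zero_add, pv_foldl_const, PySem.List.length_pyRange_one]
      have hlenk : ((key : Int) - 0).toNat = k := by omega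
      rw [hlenk, pv_iter_wrap (n:Int) hn2 k (t:Int) (by omega) (by omega)]
      have hcast : ((t:Int) - (k:Int)) % (n:Int) = (((t + (n - k)) % n : Nat) : Int) := by
        have h1 : ((t:Int) - (k:Int)) = (((t + (n - k)) : Nat) : Int) - (n:Int) := by
          push_cast [Nat.cast_sub hkn.le]; omega
        rw [h1, Int.sub_emod_right]
        exact (Int.natCast_mod _ _).symm
      rw [hcast, PySem.List.pySetD_natCast, PySem.List.pyGetD_natCast]
    -- apply hstep pointwise along the fold
    have hfold :
        (List.range n).foldl (fun (res : List (List Char)) (t : Nat) =>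
          PySem.List.pySetD res
            ((PySem.List.pyRange 0 key 1).foldl (fun index _ =>
              if index - 1 < 0 then (n:Int) - 1 else index - 1) (0 + (t:Int)))
            [PySem.List.pyGetD cs (0 + (t:Int)) ' '])
          (List.replicate n ([] : List Char))
        = (List.range n).foldl
            (fun (res : List (List Char)) (t : Nat) => res.set ((t + (n - k)) % n) [cs.getD t ' '])
            (List.replicate n ([] : List Char)) :=
      List.foldl_ext _ _ _ (fun res t ht => hstep res t (List.mem_range.mp ht))
    rw [hn] at hfold ⊢
    rw [hfold, pv_loop_inv cs cs.length k rfl hk1 (hn ▸ hkn) cs.length le_rfl]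
    have hall : ∀ j : Nat, (j + k) % cs.length < cs.length := fun j => Nat.mod_lt _ (by omega)
    have hmap : (List.range cs.length).map
          (fun j => if (j + k) % cs.length < cs.length then [cs.getD ((j + k) % cs.length) ' ']
                    else ([] : List Char))
        = ((List.range cs.length).map (fun j => cs.getD ((j + k) % cs.length) ' ')).map
            (fun c => [c]) := by
      simp [hall, List.map_map, Function.comp]
    rw [hmap, PySem.Chars.join_nil_singletons,
        pv_rot cs cs.length k rfl (hn ▸ hkn)]
    rw [hkey, PySem.List.slice_from_natCast, PySem.List.slice_to_natCast]
  · rw [if_neg h, if_neg h]
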